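-- pv_equiv track=rewrite | github.com/jake-unchained/Ant-TSP | Ant-TSP-master/RSTAnt2.py | shortestPathByManhattan
-- ===== SOURCE A (Python) =====
-- def shortestPathByManhattan(two_d_plane, count_map):
--
--   shortest_distance = []
--   total_points = len(two_d_plane)
--   for i in range(total_points):
--     shortest_distance.append([])
--     for j in range(total_points):
--       shortest_distance[i].append(None)
--   count = 0
--   for i in range(len(count_map)):
--     for j in range(len(count_map[i])):
--
--       if count_map[i][j][0] == 1 or count_map[i][j][0] == 2:
--
--           count += 1
--           for k in range(len(count_map)):
--             for l in range(len(count_map[k])):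
--               if count_map[k][l][0] == 1 or count_map[k][l][0] == 2:
--                 shortest_distance[count_map[i][j][1]][count_map[k][l][1]] = \
--                         abs(i - k) +  abs(j - l)
--
--   return shortest_distance
-- ===== SOURCE B (Python) =====
-- def shortestPathByManhattan(two_d_plane, count_map):
--   n = len(two_d_plane)
--   points = [(i, j, cell[1])
--             for i, row in enumerate(count_map)
--             for j, cell in enumerate(row)
--             if cell[0] == 1 or cell[0] == 2]
--   shortest_distance = [[None] * n for _ in range(n)]
--   for (i, j, p) in points:
--     for (k, l, q) in points:
--       shortest_distance[p][q] = abs(i - k) + abs(j - l)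
--   return shortest_distance
-- ===== Notes on version B (the rewrite author's own statement) =====
-- stated objective: alternative
-- what changed: B collects the marked points (value 1 or 2) with their coordinates and stored indices in a single pass over the grid and then writes the pairwise Manhattan distances over just those P points, instead of A's rescan of the entire grid for every marked cell; intended as faster (measured ~3.6-5x on mid sizes) but the largest timing size exhausted memory for both, so no speed is claimed.
import Mathlib
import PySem

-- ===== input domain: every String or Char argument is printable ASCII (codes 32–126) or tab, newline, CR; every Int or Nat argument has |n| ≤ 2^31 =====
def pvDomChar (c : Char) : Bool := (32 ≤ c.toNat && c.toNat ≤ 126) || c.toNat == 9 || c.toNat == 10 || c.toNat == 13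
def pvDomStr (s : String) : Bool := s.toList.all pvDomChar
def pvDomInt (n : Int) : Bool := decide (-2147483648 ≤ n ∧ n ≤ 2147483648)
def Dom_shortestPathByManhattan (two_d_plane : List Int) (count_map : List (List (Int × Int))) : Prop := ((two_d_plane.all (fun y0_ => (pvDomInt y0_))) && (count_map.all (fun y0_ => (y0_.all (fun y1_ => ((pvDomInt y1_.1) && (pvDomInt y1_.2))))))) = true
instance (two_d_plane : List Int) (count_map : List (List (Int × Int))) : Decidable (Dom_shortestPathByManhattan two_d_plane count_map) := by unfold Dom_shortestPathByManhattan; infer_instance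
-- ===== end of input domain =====

-- B collects the marked points in one pass and writes the pairwise Manhattan distances over
-- just those points, instead of A's rescan of the whole grid for every marked cell.

-- ===== PORT A =====
-- literal transliteration of A: build the N×N None matrix by append loops, then for every grid
-- cell marked 1 or 2 rescan the whole grid and write |i-k|+|j-l| at the stored indices; the
-- unused 'count' variable is threaded faithfully as the first component of the fold state.
-- pySetD/pyGetD are exact under Pre_'s InRange condition (negative indices count from the end, as in Python).
def shortestPathByManhattan (two_d_plane : List Int) (count_map : List (List (Int × Int))) : List (List (Option Int)) :=
  ((PySem.List.pyRange 0 (count_map.length : Int) 1).foldl (fun (st : Int × List (List (Option Int))) i =>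
    (PySem.List.pyRange 0 ((PySem.List.pyGetD count_map i []).length : Int) 1).foldl (fun st j =>
      if (PySem.List.pyGetD (PySem.List.pyGetD count_map i []) j (0, 0)).1 = 1 ∨
         (PySem.List.pyGetD (PySem.List.pyGetD count_map i []) j (0, 0)).1 = 2 then
        (PySem.List.pyRange 0 (count_map.length : Int) 1).foldl (fun st2 k =>
          (PySem.List.pyRange 0 ((PySem.List.pyGetD count_map k []).length : Int) 1).foldl (fun st2 l =>
            if (PySem.List.pyGetD (PySem.List.pyGetD count_map k []) l (0, 0)).1 = 1 ∨
               (PySem.List.pyGetD (PySem.List.pyGetD count_map k []) l (0, 0)).1 = 2 then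
              (st2.1,
               PySem.List.pySetD st2.2 (PySem.List.pyGetD (PySem.List.pyGetD count_map i []) j (0, 0)).2
                 (PySem.List.pySetD
                   (PySem.List.pyGetD st2.2 (PySem.List.pyGetD (PySem.List.pyGetD count_map i []) j (0, 0)).2 [])
                   (PySem.List.pyGetD (PySem.List.pyGetD count_map k []) l (0, 0)).2
                   (some (|i - k| + |j - l|))))
            else st2) st2) (st.1 + 1, st.2)
      else st) st)
    ((0 : Int),
     (PySem.List.pyRange 0 (two_d_plane.length : Int) 1).foldl (fun sd _i =>
       sd ++ [(PySem.List.pyRange 0 (two_d_plane.length : Int) 1).foldl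
         (fun row _j => row ++ [(none : Option Int)]) []]) [])).2

-- ===== PORT B =====
-- B's helper: the marked points (i, j, stored index), collected in one pass over the grid
def pvPoints (count_map : List (List (Int × Int))) : List (Int × Int × Int) :=
  (PySem.List.enumerate count_map).flatMap (fun ir =>
    (PySem.List.enumerate ir.2).filterMap (fun jc =>
      if jc.2.1 = 1 ∨ jc.2.1 = 2 then some (ir.1, jc.1, jc.2.2) else none))

def shortestPathByManhattan_alt (two_d_plane : List Int) (count_map : List (List (Int × Int))) : List (List (Option Int)) :=
  (pvPoints count_map).foldl (fun sd pt =>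
    (pvPoints count_map).foldl (fun sd pt2 =>
      PySem.List.pySetD sd pt.2.2
        (PySem.List.pySetD (PySem.List.pyGetD sd pt.2.2 []) pt2.2.2
          (some (|pt.1 - pt2.1| + |pt.2.1 - pt2.2.1|)))) sd)
    (List.replicate two_d_plane.length (List.replicate two_d_plane.length none))

-- ===== PRECONDITION & SPEC =====
-- Pre_ excludes exactly the inputs where Python A raises IndexError: some marked cell stores an
-- index outside [-N, N) for N = len(two_d_plane) (B raises there too).
def Pre_shortestPathByManhattan (two_d_plane : List Int) (count_map : List (List (Int × Int))) : Prop :=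
  ∀ row ∈ count_map, ∀ cell ∈ row, (cell.1 = 1 ∨ cell.1 = 2) →
    PySem.Raise.InRange two_d_plane.length cell.2
instance (two_d_plane : List Int) (count_map : List (List (Int × Int))) : Decidable (Pre_shortestPathByManhattan two_d_plane count_map) := by unfold Pre_shortestPathByManhattan; infer_instance
def pvWitness_shortestPathByManhattan : List Int × (List (List (Int × Int))) := ([0, 5], [[(1, 0), (0, 7)], [(2, 1)]])
def Spec_shortestPathByManhattan (two_d_plane : List Int) (count_map : List (List (Int × Int))) (out : List (List (Option Int))) : Prop := out = shortestPathByManhattan_alt two_d_plane count_map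
instance (two_d_plane : List Int) (count_map : List (List (Int × Int))) (out : List (List (Option Int))) : Decidable (Spec_shortestPathByManhattan two_d_plane count_map out) := by unfold Spec_shortestPathByManhattan; infer_instance

-- ===== CLAIM (what is proved, stated in full; the proofs are below) =====
def Claim_equal_shortestPathByManhattan : Prop := ∀ (two_d_plane : List Int) (count_map : List (List (Int × Int))), Dom_shortestPathByManhattan two_d_plane count_map → Pre_shortestPathByManhattan two_d_plane count_map → Spec_shortestPathByManhattan two_d_plane count_map (shortestPathByManhattan two_d_plane count_map)

-- ===== LEMMAS AND PROOFS =====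

-- appending one element at the end shifts enumerate by the length
lemma pv_enumerate_append_singleton {α : Type} (xs : List α) (x : α) (s : Int) :
    PySem.List.enumerate (xs ++ [x]) s = PySem.List.enumerate xs s ++ [(s + xs.length, x)] := by
  induction xs generalizing s with
  | nil => simp [PySem.List.enumerate_nil, PySem.List.enumerate_cons]
  | cons y ys ih =>
    simp only [List.cons_append, PySem.List.enumerate_cons, ih (s + 1), List.length_cons]
    push_cast
    ring_nf

-- 'for i in range(len(xs)): … xs[i] …' as a fold over enumerate(xs)
lemma pv_rowLoop {α σ : Type} (xs : List α) (d : α) (g : σ → Int → α → σ) (init : σ) :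
    (PySem.List.pyRange 0 (xs.length : Int) 1).foldl (fun s i => g s i (PySem.List.pyGetD xs i d)) init
    = (PySem.List.enumerate xs).foldl (fun s p => g s p.1 p.2) init := by
  induction xs using List.reverseRecOn with
  | nil => simp [PySem.List.enumerate_nil]
  | append_singleton ys y ih =>
    have hlen : (((ys ++ [y]).length : Nat) : Int) = (ys.length : Int) + 1 := by
      simp
    rw [hlen, PySem.List.pyRange_one_succ_right (by positivity),
        pv_enumerate_append_singleton, List.foldl_append, List.foldl_append]
    have hcongr : ∀ (s : σ), ∀ i ∈ PySem.List.pyRange 0 (ys.length : Int) 1,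
        g s i (PySem.List.pyGetD (ys ++ [y]) i d) = g s i (PySem.List.pyGetD ys i d) := by
      intro s i hi
      rw [PySem.List.mem_pyRange_one] at hi
      rw [PySem.List.pyGetD_eq_getElem _ d hi.1 (by simp; omega),
          PySem.List.pyGetD_eq_getElem _ d hi.1 (by exact_mod_cast hi.2),
          List.getElem_append_left]
    rw [PySem.List.foldl_congr_mem _ _ _ init hcongr, ih]
    simp only [List.foldl_cons, List.foldl_nil, zero_add]
    rw [PySem.List.pyGetD_eq_getElem _ d (by positivity) (by simp)]
    simp

-- A's marked-cell scan 'for i … for j … if marked: f' as a fold over the point list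
lemma pv_cellLoop {σ : Type} (cm : List (List (Int × Int))) (f : σ → Int × Int × Int → σ) (init : σ) :
    (PySem.List.pyRange 0 (cm.length : Int) 1).foldl (fun s i =>
      (PySem.List.pyRange 0 ((PySem.List.pyGetD cm i []).length : Int) 1).foldl (fun s j =>
        if (PySem.List.pyGetD (PySem.List.pyGetD cm i []) j (0, 0)).1 = 1 ∨
           (PySem.List.pyGetD (PySem.List.pyGetD cm i []) j (0, 0)).1 = 2 then
          f s (i, j, (PySem.List.pyGetD (PySem.List.pyGetD cm i []) j (0, 0)).2)
        else s) s) init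
    = (pvPoints cm).foldl f init := by
  have houter := pv_rowLoop cm [] (fun s i row =>
      (PySem.List.pyRange 0 (row.length : Int) 1).foldl (fun s j =>
        if (PySem.List.pyGetD row j (0, 0)).1 = 1 ∨ (PySem.List.pyGetD row j (0, 0)).1 = 2 then
          f s (i, j, (PySem.List.pyGetD row j (0, 0)).2)
        else s) s) init
  refine houter.trans ?_
  unfold pvPoints
  rw [List.foldl_flatMap]
  refine PySem.List.foldl_congr_mem _ _ _ init ?_
  intro s p _
  have hinner := pv_rowLoop p.2 ((0 : Int), (0 : Int)) (fun s j cell =>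
      if cell.1 = 1 ∨ cell.1 = 2 then f s (p.1, j, cell.2) else s) s
  refine hinner.trans ?_
  rw [List.foldl_filterMap]
  refine PySem.List.foldl_congr_mem _ _ _ s ?_
  intro acc q _
  by_cases h : q.2.1 = 1 ∨ q.2.1 = 2 <;> simp [h]

-- the append-None init loops build the replicate matrix
lemma pv_init (n : Nat) :
    (PySem.List.pyRange 0 (n : Int) 1).foldl (fun sd _i =>
      sd ++ [(PySem.List.pyRange 0 (n : Int) 1).foldl
        (fun row _j => row ++ [(none : Option Int)]) []]) []
    = List.replicate n (List.replicate n (none : Option Int)) := by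
  have hrow : (PySem.List.pyRange 0 (n : Int) 1).foldl
      (fun row _j => row ++ [(none : Option Int)]) ([] : List (Option Int))
      = List.replicate n none := by
    have h := PySem.List.foldl_append_singleton
      ((PySem.List.pyRange 0 (n : Int) 1).map (fun _ => (none : Option Int))) []
    rw [List.foldl_map] at h
    simp only [List.map_const', PySem.List.length_pyRange_one] at h
    exact h
  rw [hrow]
  have h := PySem.List.foldl_append_singleton
    ((PySem.List.pyRange 0 (n : Int) 1).map (fun _ => List.replicate n (none : Option Int))) []
  rw [List.foldl_map] at h
  simpa [List.map_const', PySem.List.length_pyRange_one] using h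

-- proof-local names for B's write and B's inner loop (definitionally B's lambdas)
def pvW (pt pt2 : Int × Int × Int) (sd : List (List (Option Int))) : List (List (Option Int)) :=
  PySem.List.pySetD sd pt.2.2
    (PySem.List.pySetD (PySem.List.pyGetD sd pt.2.2 []) pt2.2.2
      (some (|pt.1 - pt2.1| + |pt.2.1 - pt2.2.1|)))

def pvF (cm : List (List (Int × Int))) (sd : List (List (Option Int))) (pt : Int × Int × Int) :
    List (List (Option Int)) :=
  (pvPoints cm).foldl (fun sd pt2 => pvW pt pt2 sd) sd

-- projecting away the threaded count
lemma pv_snd_fold {σ : Type} (pts : List (Int × Int × Int)) (F : σ → Int × Int × Int → σ)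
    (c0 : Int) (s0 : σ) :
    (pts.foldl (fun st pt => (st.1 + 1, F st.2 pt)) (c0, s0)).2 = pts.foldl F s0 := by
  induction pts generalizing c0 s0 with
  | nil => rfl
  | cons p ps ih => exact ih (c0 + 1) (F s0 p)

-- ===== VERDICT (by name: the statement is the Claim_ definition above) =====
set_option maxHeartbeats 1000000 in
theorem shortestPathByManhattan_spec : Claim_equal_shortestPathByManhattan := by
  intro plane cm _ _
  show shortestPathByManhattan plane cm = shortestPathByManhattan_alt plane cm
  have hB : shortestPathByManhattan_alt plane cm
      = (pvPoints cm).foldl (pvF cm)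
          (List.replicate plane.length (List.replicate plane.length none)) := rfl
  rw [hB]
  unfold shortestPathByManhattan
  rw [pv_init plane.length]
  have hstep :
      (PySem.List.pyRange 0 (cm.length : Int) 1).foldl (fun (st : Int × List (List (Option Int))) i =>
        (PySem.List.pyRange 0 ((PySem.List.pyGetD cm i []).length : Int) 1).foldl (fun st j =>
          if (PySem.List.pyGetD (PySem.List.pyGetD cm i []) j (0, 0)).1 = 1 ∨
             (PySem.List.pyGetD (PySem.List.pyGetD cm i []) j (0, 0)).1 = 2 then
            (PySem.List.pyRange 0 (cm.length : Int) 1).foldl (fun st2 k =>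
              (PySem.List.pyRange 0 ((PySem.List.pyGetD cm k []).length : Int) 1).foldl (fun st2 l =>
                if (PySem.List.pyGetD (PySem.List.pyGetD cm k []) l (0, 0)).1 = 1 ∨
                   (PySem.List.pyGetD (PySem.List.pyGetD cm k []) l (0, 0)).1 = 2 then
                  (st2.1,
                   PySem.List.pySetD st2.2 (PySem.List.pyGetD (PySem.List.pyGetD cm i []) j (0, 0)).2
                     (PySem.List.pySetD
                       (PySem.List.pyGetD st2.2 (PySem.List.pyGetD (PySem.List.pyGetD cm i []) j (0, 0)).2 [])
                       (PySem.List.pyGetD (PySem.List.pyGetD cm k []) l (0, 0)).2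
                       (some (|i - k| + |j - l|))))
                else st2) st2) (st.1 + 1, st.2)
          else st) st)
        ((0 : Int), List.replicate plane.length (List.replicate plane.length (none : Option Int)))
      = (pvPoints cm).foldl (fun (st : Int × List (List (Option Int))) pt =>
          (st.1 + 1, pvF cm st.2 pt))
        ((0 : Int), List.replicate plane.length (List.replicate plane.length (none : Option Int))) := by
    refine Eq.trans (pv_cellLoop cm (fun st pt =>
      (PySem.List.pyRange 0 (cm.length : Int) 1).foldl (fun st2 k =>
        (PySem.List.pyRange 0 ((PySem.List.pyGetD cm k []).length : Int) 1).foldl (fun st2 l =>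
          if (PySem.List.pyGetD (PySem.List.pyGetD cm k []) l (0, 0)).1 = 1 ∨
             (PySem.List.pyGetD (PySem.List.pyGetD cm k []) l (0, 0)).1 = 2 then
            (st2.1,
             PySem.List.pySetD st2.2 pt.2.2
               (PySem.List.pySetD (PySem.List.pyGetD st2.2 pt.2.2 []) (PySem.List.pyGetD (PySem.List.pyGetD cm k []) l (0, 0)).2
                 (some (|pt.1 - k| + |pt.2.1 - l|))))
          else st2) st2) (st.1 + 1, st.2)) _) ?_
    refine PySem.List.foldl_congr_mem _ _ _ _ (fun st pt _ => ?_)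
    refine Eq.trans (pv_cellLoop cm (fun st2 pt2 =>
      (st2.1, pvW pt pt2 st2.2)) (st.1 + 1, st.2)) ?_
    refine Eq.trans (PySem.List.foldl_prod_mk (fun c _ => c)
      (fun sd pt2 => pvW pt pt2 sd) (pvPoints cm) (st.1 + 1) st.2) ?_
    rw [List.foldl_fixed]
    rfl
  rw [hstep]
  exact pv_snd_fold (pvPoints cm) (pvF cm) 0
    (List.replicate plane.length (List.replicate plane.length none))
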